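-- pv_equiv track=rewrite | github.com/opendemo-work/opendemo-cli | opendemo/core/library_detector.py | looks_like_library_name
-- ===== SOURCE A (Python) =====
-- def looks_like_library_name(keyword: str) -> bool:
--     """
--     判断关键字是否看起来像库名
--
--     库名特征：
--     - 单个单词（无空格）
--     - 全小写或带连字符/下划线
--     - 不包含中文
--     - 长度适中（2-30字符）
--
--     Args:
--         keyword: 待检测的关键字
--
--     Returns:
--         是否看起来像库名
--     """
--     if not keyword:
--         return False
--
--     # 转小写
--     kw = keyword.lower().strip()
--
--     # 长度检查
--     if len(kw) < 2 or len(kw) > 30: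
--         return False
--
--     # 不能包含中文字符
--     for char in kw:
--         if '\u4e00' <= char <= '\u9fff':
--             return False
--
--     # 只允许字母、数字、连字符、下划线
--     allowed_chars = set('abcdefghijklmnopqrstuvwxyz0123456789-_')
--     if not all(c in allowed_chars for c in kw):
--         return False
--
--     # 必须以字母开头
--     if not kw[0].isalpha():
--         return False
--
--     return True
-- ===== SOURCE B (Python) =====
-- def looks_like_library_name(keyword: str) -> bool:
--     if not keyword:
--         return False
--     kw = keyword.lower().strip()
--     # single left-to-right pass over a 3-state DFA: 0 = start, 1 = accepting, -1 = dead
--     state = 0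
--     n = 0
--     for c in kw:
--         n += 1
--         if state == 0:
--             state = 1 if 'a' <= c <= 'z' else -1
--         elif state == 1:
--             if not ('a' <= c <= 'z' or '0' <= c <= '9' or c == '-' or c == '_'):
--                 state = -1
--     return state == 1 and 2 <= n <= 30
-- ===== Notes on version B (the rewrite author's own statement) =====
-- stated objective: alternative
-- what changed: A's staged guard chain (length check, then a CJK-range scan, then an allowed-character all() scan, then a first-char isalpha check, each a separate pass over kw) is replaced by a single left-to-right pass over a 3-state DFA (start/accepting/dead) that consumes each character once while counting length; the CJK scan disappears because CJK characters are already rejected by the DFA's transitions.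
import Mathlib
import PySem

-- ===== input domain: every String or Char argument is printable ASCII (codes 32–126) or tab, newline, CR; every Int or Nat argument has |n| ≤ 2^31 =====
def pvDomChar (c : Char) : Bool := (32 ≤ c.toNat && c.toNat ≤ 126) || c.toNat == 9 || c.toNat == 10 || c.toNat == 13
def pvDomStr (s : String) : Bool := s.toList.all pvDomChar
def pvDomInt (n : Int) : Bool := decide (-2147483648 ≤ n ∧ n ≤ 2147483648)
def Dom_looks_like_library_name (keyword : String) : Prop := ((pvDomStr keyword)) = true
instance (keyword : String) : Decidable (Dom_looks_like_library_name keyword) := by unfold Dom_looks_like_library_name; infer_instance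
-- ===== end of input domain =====

-- B replaces A's staged guard chain (length check, CJK scan, allowed-char all() scan, first-char
-- isalpha) by a single left-to-right pass over a 3-state DFA (start/accepting/dead) with a length
-- counter; alternative decomposition, not faster.

-- ===== PORT A =====
def pvAllowedA : PySem.Set Char :=
  PySem.Set.ofList "abcdefghijklmnopqrstuvwxyz0123456789-_".toList

def looks_like_library_name (keyword : String) : Bool :=
  if keyword == "" then false
  else
    let kw := PySem.Chars.strip (PySem.Chars.lower keyword.toList)
    if kw.length < 2 || 30 < kw.length then false
    else if kw.any (fun c => decide ('\u4e00' ≤ c) && decide (c ≤ '\u9fff')) then false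
    else if !(kw.all (fun c => PySem.Set.contains pvAllowedA c)) then false
    else
      match PySem.List.pyGet? kw 0 with
      | none => false   -- unreachable: kw.length ≥ 2 here
      | some c => if !(PySem.Chars.isalpha c) then false else true

-- ===== PORT B =====
-- 'a' <= c <= 'z'
def pvAz (c : Char) : Bool := decide ('a' ≤ c) && decide (c ≤ 'z')

-- 'a' <= c <= 'z' or '0' <= c <= '9' or c == '-' or c == '_'
def pvAllowedChar (c : Char) : Bool :=
  pvAz c || (decide ('0' ≤ c) && decide (c ≤ '9')) || c == '-' || c == '_'

-- the DFA transition: state 0 = start, 1 = accepting, -1 = dead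
def pvStep (s : Int) (c : Char) : Int :=
  if s == 0 then (if pvAz c then 1 else -1)
  else if s == 1 then (if pvAllowedChar c then 1 else -1)
  else s

def looks_like_library_name_alt (keyword : String) : Bool :=
  if keyword == "" then false
  else
    let kw := PySem.Chars.strip (PySem.Chars.lower keyword.toList)
    let r := kw.foldl (fun (p : Int × Int) c => (pvStep p.1 c, p.2 + 1)) (0, 0)
    decide (r.1 = 1) && decide (2 ≤ r.2) && decide (r.2 ≤ 30)

-- ===== PRECONDITION & SPEC =====
def Spec_looks_like_library_name (keyword : String) (out : Bool) : Prop := out = looks_like_library_name_alt keyword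
instance (keyword : String) (out : Bool) : Decidable (Spec_looks_like_library_name keyword out) := by unfold Spec_looks_like_library_name; infer_instance

-- ===== CLAIM (what is proved, stated in full; the proofs are below) =====
def Claim_equal_looks_like_library_name : Prop := ∀ (keyword : String), Dom_looks_like_library_name keyword → Spec_looks_like_library_name keyword (looks_like_library_name keyword)

-- ===== LEMMAS AND PROOFS =====

-- the paired fold computes (DFA state, length)
lemma pv_fold_pair (l : List Char) (s n : Int) :
    l.foldl (fun (p : Int × Int) c => (pvStep p.1 c, p.2 + 1)) (s, n)
      = (l.foldl pvStep s, n + l.length) := by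
  induction l generalizing s n with
  | nil => simp
  | cons c rest ih => simp [List.foldl_cons, ih]; ring

-- the dead state is absorbing
lemma pv_fold_dead (l : List Char) : l.foldl pvStep (-1) = -1 := by
  induction l with
  | nil => rfl
  | cons c rest ih => simpa [List.foldl_cons, pvStep] using ih

-- from the accepting state, the fold checks the allowed-char predicate
lemma pv_fold_one (l : List Char) :
    l.foldl pvStep 1 = if l.all pvAllowedChar then 1 else -1 := by
  induction l with
  | nil => rfl
  | cons c rest ih =>
    by_cases h : pvAllowedChar c = true
    · simp [List.foldl_cons, pvStep, h, ih]
    · have h' : pvAllowedChar c = false := by simpa using h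
      simp [List.foldl_cons, pvStep, h', pv_fold_dead]

-- full characterisation of the DFA run from the start state
lemma pv_fold_zero (c : Char) (rest : List Char) :
    (c :: rest).foldl pvStep 0
      = if pvAz c && rest.all pvAllowedChar then 1 else -1 := by
  by_cases h : pvAz c = true
  · simp [List.foldl_cons, pvStep, h, pv_fold_one]
  · simp [Bool.not_eq_true] at h
    simp [List.foldl_cons, pvStep, h, pv_fold_dead]

-- membership in A's literal allowed set is exactly B's range test
lemma pv_contains_eq (c : Char) :
    PySem.Set.contains pvAllowedA c = pvAllowedChar c := by
  rw [PySem.Set.contains_eq_listContains, List.contains_eq_mem, Bool.eq_iff_iff]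
  constructor
  · intro h
    have hmem : c ∈ pvAllowedA := by simpa using h
    have hall : pvAllowedA.all (fun x => pvAllowedChar x) = true := by decide
    simpa using (List.all_eq_true.mp hall) c hmem
  · intro h
    simp only [pvAllowedChar, pvAz, Bool.or_eq_true, Bool.and_eq_true,
      decide_eq_true_eq, beq_iff_eq] at h
    simp only [decide_eq_true_eq]
    rcases h with ((⟨h1, h2⟩ | ⟨h1, h2⟩) | h) | h
    · have l1 : 97 ≤ c.toNat := by simpa using UInt32.le_iff_toNat_le.mp (Char.le_def.mp h1)
      have l2 : c.toNat ≤ 122 := by simpa using UInt32.le_iff_toNat_le.mp (Char.le_def.mp h2)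
      rw [← Char.ofNat_toNat c]
      interval_cases h : c.toNat <;> decide
    · have l1 : 48 ≤ c.toNat := by simpa using UInt32.le_iff_toNat_le.mp (Char.le_def.mp h1)
      have l2 : c.toNat ≤ 57 := by simpa using UInt32.le_iff_toNat_le.mp (Char.le_def.mp h2)
      rw [← Char.ofNat_toNat c]
      interval_cases h : c.toNat <;> decide
    · subst h; decide
    · subst h; decide

-- every char of A's allowed set is below the CJK range
lemma pv_allowed_not_cjk (c : Char) (h : c ∈ pvAllowedA) :
    (decide ('\u4e00' ≤ c) && decide (c ≤ '\u9fff')) = false := by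
  have hall : pvAllowedA.all (fun c => !(decide ('\u4e00' ≤ c) && decide (c ≤ '\u9fff'))) = true := by
    decide
  have h2 := (List.all_eq_true.mp hall) c h
  simp only [Bool.not_eq_true'] at h2
  exact h2

-- on chars of A's allowed set, isalpha coincides with B's a-z range test
lemma pv_allowed_isalpha (c : Char) (h : c ∈ pvAllowedA) :
    PySem.Chars.isalpha c = pvAz c := by
  have hall : pvAllowedA.all (fun c => PySem.Chars.isalpha c == pvAz c) = true := by decide
  simpa using (List.all_eq_true.mp hall) c h

-- the branch bodies of the two ports agree on every normalized char list kw
lemma pv_core (kw : List Char) :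
    (if kw.length < 2 || 30 < kw.length then false
     else if kw.any (fun c => decide ('\u4e00' ≤ c) && decide (c ≤ '\u9fff')) then false
     else if !(kw.all (fun c => PySem.Set.contains pvAllowedA c)) then false
     else match PySem.List.pyGet? kw 0 with
          | none => false
          | some c => if !(PySem.Chars.isalpha c) then false else true)
    = (let r := kw.foldl (fun (p : Int × Int) c => (pvStep p.1 c, p.2 + 1)) (0, 0)
       decide (r.1 = 1) && decide (2 ≤ r.2) && decide (r.2 ≤ 30)) := by
  simp only [pv_fold_pair, Int.zero_add]
  rcases kw with _ | ⟨c, rest⟩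
  · decide
  · rw [pv_fold_zero]
    simp only [PySem.List.pyGet?_zero_cons]
    by_cases h2 : (c :: rest).length < 2 || 30 < (c :: rest).length
    · rw [if_pos h2]
      symm
      simp only [Bool.or_eq_true, decide_eq_true_eq] at h2
      rcases h2 with h2 | h2
      · have h2' : rest.length + 1 < 2 := by simpa using h2
        simp
        intro _ _ _
        omega
      · have h2' : 30 < rest.length + 1 := by simpa using h2
        simp
        intro _ _ _
        omega
    · rw [if_neg (by simp_all)]
      simp only [Bool.or_eq_true, decide_eq_true_eq, not_or, not_lt] at h2
      have hlen : (decide ((2:Int) ≤ ((c :: rest).length : Int)) && decide ((((c :: rest).length : Int)) ≤ 30)) = true := by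
        simp only [Bool.and_eq_true, decide_eq_true_eq]
        constructor
        · exact_mod_cast h2.1
        · exact_mod_cast h2.2
      by_cases hall : (c :: rest).all (fun x => PySem.Set.contains pvAllowedA x) = true
      · have hmem : ∀ x ∈ c :: rest, x ∈ pvAllowedA := by
          intro x hx
          have := (List.all_eq_true.mp hall) x hx
          simpa [PySem.Set.contains_eq_listContains, List.contains_eq_mem] using this
        have hnocjk : (c :: rest).any
            (fun x => decide ('\u4e00' ≤ x) && decide (x ≤ '\u9fff')) = false := by
          rw [List.any_eq_false]
          intro x hx
          simp [pv_allowed_not_cjk x (hmem x hx)]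
        have hrest : rest.all pvAllowedChar = true := by
          rw [List.all_eq_true]
          intro x hx
          rw [← pv_contains_eq]
          exact (List.all_eq_true.mp hall) x (by simp [hx])
        rw [hnocjk, if_neg (by simp), hall, if_neg (by simp)]
        rw [pv_allowed_isalpha c (hmem c (by simp)), hrest]
        cases haz : pvAz c
        · simp
        · simp only [List.length_cons] at h2
          simp
          refine ⟨by omega, by omega⟩
      · have hall' : (c :: rest).all (fun x => PySem.Set.contains pvAllowedA x) = false := by
          simpa using hall
        have hB : (pvAz c && rest.all pvAllowedChar) = false := by
          simp only [List.all_cons, pv_contains_eq, Bool.and_eq_false_iff] at hall' ⊢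
          rcases hall' with h | h
          · left
            cases haz : pvAz c
            · rfl
            · exfalso; simp [pvAllowedChar, haz] at h
          · right; exact h
        rw [hall']
        by_cases hcjk : (c :: rest).any
            (fun x => decide ('\u4e00' ≤ x) && decide (x ≤ '\u9fff')) = true
        · rw [if_pos hcjk]; simp [hB]
        · rw [if_neg hcjk, if_pos (by simp)]; simp [hB]

-- ===== VERDICT (by name: the statement is the Claim_ definition above) =====
theorem looks_like_library_name_spec : Claim_equal_looks_like_library_name := by
  intro keyword _
  unfold Spec_looks_like_library_name looks_like_library_name looks_like_library_name_alt
  by_cases hk : keyword == ""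
  · simp [hk]
  · simp only [hk, Bool.false_eq_true, if_false]
    exact pv_core _
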